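-- pv_equiv track=rewrite | github.com/b-vitamins/ossm | train.py | _normalize_hydra_overrides
-- ===== SOURCE A (Python) =====
-- from typing import Deque, Dict, Iterable, List, Optional, Sequence, Tuple
--
-- def _missing_override_value(token: str) -> ValueError:
--     message = (
--         f"Hydra override '{token}' is missing a value. Use 'key=value' syntax or "
--         "a recognised CLI flag (e.g. '--optimizer adamw')."
--     )
--     return ValueError(message)
--
-- def _normalize_hydra_overrides(overrides: Sequence[str]) -> List[str]:
--     """Coerce space-separated Hydra overrides into ``key=value`` pairs."""
--
--     normalised: List[str] = []
--     i = 0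
--     while i < len(overrides):
--         token = overrides[i]
--
--         if "=" in token or token.startswith(("+", "-", "?", "~")):
--             normalised.append(token)
--         else:
--             if i + 1 >= len(overrides):
--                 raise _missing_override_value(token)
--             next_token = overrides[i + 1]
--             if "=" in next_token or next_token.startswith("-"):
--                 raise _missing_override_value(token)
--             normalised.append(f"{token}={next_token}")
--             i += 1
--         i += 1
--     return normalised
-- ===== SOURCE B (Python) =====
-- from typing import List, Optional, Sequence
--
--
-- def _missing_override_value(token: str) -> ValueError:
--     message = (
--         f"Hydra override '{token}' is missing a value. Use 'key=value' syntax or "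
--         "a recognised CLI flag (e.g. '--optimizer adamw')."
--     )
--     return ValueError(message)
--
--
-- def _normalize_hydra_overrides(overrides: Sequence[str]) -> List[str]:
--     """Coerce space-separated Hydra overrides into ``key=value`` pairs."""
--     normalised: List[str] = []
--     pending: Optional[str] = None  # bare key waiting for its value
--     for token in overrides:
--         if pending is not None:
--             if "=" in token or token.startswith("-"):
--                 raise _missing_override_value(pending)
--             normalised.append(f"{pending}={token}")
--             pending = None
--         elif "=" in token or token.startswith(("+", "-", "?", "~")):
--             normalised.append(token)
--         else:
--             pending = token
--     if pending is not None:
--         raise _missing_override_value(pending)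
--     return normalised
-- ===== Notes on version B (the rewrite author's own statement) =====
-- stated objective: alternative
-- what changed: Replaces A's index loop with lookahead (overrides[i+1]) and manual skip (i += 1 twice) by a state-machine fold: a single for loop with no lookahead that carries a 'pending' bare key in its state and emits key=value when the following token arrives, with the missing-value check moved to the pending state (including a final check after the loop).
import Mathlib
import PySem

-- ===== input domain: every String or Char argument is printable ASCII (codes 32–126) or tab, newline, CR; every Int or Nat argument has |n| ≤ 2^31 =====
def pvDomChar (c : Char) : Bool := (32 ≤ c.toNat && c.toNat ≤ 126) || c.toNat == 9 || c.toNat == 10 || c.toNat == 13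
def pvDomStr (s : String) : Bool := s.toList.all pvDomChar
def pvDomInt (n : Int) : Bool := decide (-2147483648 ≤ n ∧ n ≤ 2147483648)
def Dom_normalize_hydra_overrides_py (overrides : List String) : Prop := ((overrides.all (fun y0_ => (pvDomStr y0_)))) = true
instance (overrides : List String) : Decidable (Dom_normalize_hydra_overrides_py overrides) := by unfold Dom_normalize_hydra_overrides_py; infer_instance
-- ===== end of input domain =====

-- B replaces A's index loop with overrides[i+1] lookahead and manual double increment by a
-- state-machine pass carrying a pending bare key in its fold state (objective: alternative).

-- ===== PORT A =====
-- token passes through unchanged: contains '=' or starts with '+', '-', '?' or '~'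
def pvPass (t : String) : Bool :=
  PySem.Str.isIn "=" t || PySem.Str.startswith t "+" || PySem.Str.startswith t "-" ||
    PySem.Str.startswith t "?" || PySem.Str.startswith t "~"

-- next_token rejected as a value: contains '=' or starts with '-'
def pvBadVal (v : String) : Bool := PySem.Str.isIn "=" v || PySem.Str.startswith v "-"

-- the 'while i < len(overrides)' loop of A; on the two 'raise' branches the Python raises
-- ValueError — those inputs are excluded by Pre_ below, the returned value there is unclaimed
def pvALoop (ov : List String) (i : Nat) (acc : List String) : List String :=
  if h : i < ov.length then
    let token := ov[i]
    if pvPass token then pvALoop ov (i + 1) (acc ++ [token])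
    else if h2 : ov.length ≤ i + 1 then acc  -- raise _missing_override_value(token)
    else
      let next_token := ov[i + 1]'(by omega)
      if pvBadVal next_token then acc  -- raise _missing_override_value(token)
      else pvALoop ov (i + 2) (acc ++ [token ++ "=" ++ next_token])
  else acc
termination_by ov.length - i

def normalize_hydra_overrides_py (overrides : List String) : List String :=
  pvALoop overrides 0 []

-- ===== PORT B =====
-- one step of B's for-loop: state = (normalised so far, pending bare key);
-- on the 'raise' branch the Python raises ValueError (outside Pre_), the state is left as is
def pvBStep (st : List String × Option String) (token : String) : List String × Option String :=
  match st.2 with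
  | some k => if pvBadVal token then st  -- raise _missing_override_value(pending)
              else (st.1 ++ [k ++ "=" ++ token], none)
  | none => if pvPass token then (st.1 ++ [token], none) else (st.1, some token)

-- B's for-loop is a fold over the tokens; a leftover pending key means Python raises (outside Pre_)
def normalize_hydra_overrides_py_alt (overrides : List String) : List String :=
  (overrides.foldl pvBStep ([], none)).1

-- ===== PRECONDITION & SPEC =====
-- Pre_ excludes exactly the inputs on which A raises ValueError ('missing a value'): it is the
-- grammar (pass-through token | bare key followed by a plain value)* over the input list.
def pvWf : List String → Bool
  | [] => true
  | token :: rest =>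
    if pvPass token then pvWf rest
    else
      match rest with
      | [] => false
      | next_token :: rest' => !pvBadVal next_token && pvWf rest'

def Pre_normalize_hydra_overrides_py (overrides : List String) : Prop := pvWf overrides = true
instance (overrides : List String) : Decidable (Pre_normalize_hydra_overrides_py overrides) := by unfold Pre_normalize_hydra_overrides_py; infer_instance

def pvWitness_normalize_hydra_overrides_py : List String := ["optimizer", "adamw", "+trainer.max_epochs=5", "lr", "0.1"]

def Spec_normalize_hydra_overrides_py (overrides : List String) (out : List String) : Prop := out = normalize_hydra_overrides_py_alt overrides
instance (overrides : List String) (out : List String) : Decidable (Spec_normalize_hydra_overrides_py overrides out) := by unfold Spec_normalize_hydra_overrides_py; infer_instance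

-- ===== CLAIM (what is proved, stated in full; the proofs are below) =====
def Claim_equal_normalize_hydra_overrides_py : Prop := ∀ (overrides : List String), Dom_normalize_hydra_overrides_py overrides → Pre_normalize_hydra_overrides_py overrides → Spec_normalize_hydra_overrides_py overrides (normalize_hydra_overrides_py overrides)

-- ===== LEMMAS AND PROOFS =====
-- Loop invariant: when the suffix of ov from index i is l and l is grammatical, A's loop on
-- (i, acc) returns exactly what B's fold produces when started in state (acc, no pending key)
-- and run over l.
theorem pvALoop_eq (l : List String) (ov : List String) (i : Nat) (acc : List String)
    (hl : ov.drop i = l) (hwf : pvWf l = true) :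
    pvALoop ov i acc = (l.foldl pvBStep (acc, none)).1 := by
  cases l with
  | nil =>
    have h : ¬ i < ov.length := by
      by_contra hc
      rw [List.drop_eq_getElem_cons hc] at hl
      exact List.cons_ne_nil _ _ hl
    unfold pvALoop
    rw [dif_neg h]
    simp
  | cons token rest =>
    have h : i < ov.length := by
      by_contra hc
      rw [List.drop_eq_nil_of_le (by omega)] at hl
      exact List.cons_ne_nil _ _ hl.symm
    have hcons := (List.drop_eq_getElem_cons h).symm.trans hl
    have htok : ov[i] = token := by injection hcons
    have hrest : ov.drop (i + 1) = rest := by injection hcons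
    by_cases hp : pvPass token
    · have hwf1 : pvWf rest = true := by
        rw [pvWf.eq_def] at hwf; simpa [hp] using hwf
      unfold pvALoop
      rw [dif_pos h, htok, if_pos hp, pvALoop_eq rest ov (i + 1) _ hrest hwf1]
      simp [pvBStep, hp]
    · cases rest with
      | nil => rw [pvWf.eq_def] at hwf; simp [hp] at hwf
      | cons next_token rest' =>
        have hwf' : pvBadVal next_token = false ∧ pvWf rest' = true := by
          rw [pvWf.eq_def] at hwf; simpa [hp] using hwf
        have h1 : i + 1 < ov.length := by
          by_contra hc
          rw [List.drop_eq_nil_of_le (by omega)] at hrest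
          exact List.cons_ne_nil _ _ hrest.symm
        have hcons1 := (List.drop_eq_getElem_cons h1).symm.trans hrest
        have hnt : ov[i + 1] = next_token := by injection hcons1
        have hrest' : ov.drop (i + 2) = rest' := by injection hcons1
        unfold pvALoop
        rw [dif_pos h, htok, if_neg hp, dif_neg (by omega : ¬ ov.length ≤ i + 1), hnt,
          if_neg (by simp [hwf'.1]), pvALoop_eq rest' ov (i + 2) _ hrest' hwf'.2]
        simp [pvBStep, hp, hwf'.1]
termination_by l.length
decreasing_by all_goals (subst_vars; simp; omega)

-- ===== VERDICT (by name: the statement is the Claim_ definition above) =====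
theorem normalize_hydra_overrides_py_spec : Claim_equal_normalize_hydra_overrides_py := by
  intro ov _ hpre
  unfold Spec_normalize_hydra_overrides_py normalize_hydra_overrides_py normalize_hydra_overrides_py_alt
  simpa using pvALoop_eq ov ov 0 [] (by simp) hpre
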